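-- pv_equiv track=rewrite | github.com/Charmull/Algorithm_Python | 프로그래머스/1/17681. ［1차］ 비밀지도/［1차］ 비밀지도.py | solution
-- ===== SOURCE A (Python) =====
-- from collections import deque
--
-- def solution(n, arr1, arr2):
--     answer = []
--
--     def change_num(num):
--         deq = deque([])
--         for _ in range(n):
--             deq.appendleft(num % 2)
--             num //= 2
--         return list(deq)
--
--     def make_map(map1, map2):
--         result = []
--         for i in range(n):
--             if map1[i] == map2[i] == 0:
--                 result.append(' ')
--                 continue
--             result.append('#')
--         return ''.join(result)
--
--     for i in range(n):
--         answer.append(make_map(change_num(arr1[i]), change_num(arr2[i])))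
--
--     return answer
-- ===== SOURCE B (Python) =====
-- def solution(n, arr1, arr2):
--     answer = []
--     for i in range(n):
--         a, b = arr1[i], arr2[i]
--         row = []
--         for _ in range(n):
--             row = ['#' if a % 2 or b % 2 else ' '] + row
--             a //= 2
--             b //= 2
--         answer.append(''.join(row))
--     return answer
-- ===== Notes on version B (the rewrite author's own statement) =====
-- stated objective: simpler
-- what changed: B fuses A's two-phase pipeline (decompose each number into an n-bit list via a deque, then compare the two bit lists element-wise by index) into one loop per row that tests a%2 or b%2 and builds the row back-to-front, with no deque and no intermediate bit lists.
import Mathlib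
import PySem

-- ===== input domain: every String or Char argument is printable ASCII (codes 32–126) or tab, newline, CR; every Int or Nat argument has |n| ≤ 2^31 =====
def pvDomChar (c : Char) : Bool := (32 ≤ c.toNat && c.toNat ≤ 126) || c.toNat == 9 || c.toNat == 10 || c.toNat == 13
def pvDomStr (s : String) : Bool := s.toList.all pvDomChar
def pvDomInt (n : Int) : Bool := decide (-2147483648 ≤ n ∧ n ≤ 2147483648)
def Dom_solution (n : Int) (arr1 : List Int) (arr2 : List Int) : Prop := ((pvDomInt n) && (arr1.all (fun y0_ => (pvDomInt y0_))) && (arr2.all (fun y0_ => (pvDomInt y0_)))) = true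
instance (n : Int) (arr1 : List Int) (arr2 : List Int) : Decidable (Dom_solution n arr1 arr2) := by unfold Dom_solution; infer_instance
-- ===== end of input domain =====

-- B fuses A's two passes (bit-list decomposition via deque, then element-wise comparison)
-- into one loop per row building the row back-to-front: objective 'simpler'.

-- ===== PORT A =====
-- change_num: the deque appendleft loop; the deque as a List with cons at the front
-- (index accesses in A are ports of arr[i] via pyGetD: always in range under Pre_solution)
def changeNum (n : Int) (num : Int) : List Int :=
  ((PySem.List.pyRange 0 n 1).foldl
    (fun (st : List Int × Int) (_ : Int) =>
      (PySem.Int.mod st.2 2 :: st.1, PySem.Int.floordiv st.2 2))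
    (([] : List Int), num)).1

-- make_map: element-wise comparison of the two bit lists, then ''.join
def makeMap (n : Int) (map1 map2 : List Int) : String :=
  PySem.Str.join ""
    ((PySem.List.pyRange 0 n 1).foldl
      (fun (result : List String) (i : Int) =>
        if PySem.List.pyGetD map1 i 0 = PySem.List.pyGetD map2 i 0 ∧ PySem.List.pyGetD map2 i 0 = 0
        then result ++ [" "] else result ++ ["#"])
      [])

def solution (n : Int) (arr1 : List Int) (arr2 : List Int) : List String :=
  (PySem.List.pyRange 0 n 1).foldl
    (fun (answer : List String) (i : Int) =>
      answer ++ [makeMap n (changeNum n (PySem.List.pyGetD arr1 i 0))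
                           (changeNum n (PySem.List.pyGetD arr2 i 0))])
    []

-- ===== PORT B =====
def solution_alt (n : Int) (arr1 : List Int) (arr2 : List Int) : List String :=
  (PySem.List.pyRange 0 n 1).foldl
    (fun (answer : List String) (i : Int) =>
      answer ++ [PySem.Str.join ""
        ((PySem.List.pyRange 0 n 1).foldl
          (fun (st : List String × Int × Int) (_ : Int) =>
            ((if PySem.Int.mod st.2.1 2 ≠ 0 ∨ PySem.Int.mod st.2.2 2 ≠ 0 then "#" else " ") :: st.1,
             PySem.Int.floordiv st.2.1 2, PySem.Int.floordiv st.2.2 2))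
          (([] : List String), PySem.List.pyGetD arr1 i 0, PySem.List.pyGetD arr2 i 0)).1])
    []

-- ===== PRECONDITION & SPEC =====
-- Pre_: A reads arr1[i], arr2[i] for every i in range(n); it raises IndexError exactly
-- when n exceeds one of the list lengths.
def Pre_solution (n : Int) (arr1 : List Int) (arr2 : List Int) : Prop :=
  n ≤ (arr1.length : Int) ∧ n ≤ (arr2.length : Int)
instance (n : Int) (arr1 : List Int) (arr2 : List Int) : Decidable (Pre_solution n arr1 arr2) := by unfold Pre_solution; infer_instance

def pvWitness_solution : Int × List Int × List Int := (2, [1, 2], [2, 3])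

def Spec_solution (n : Int) (arr1 : List Int) (arr2 : List Int) (out : List String) : Prop := out = solution_alt n arr1 arr2
instance (n : Int) (arr1 : List Int) (arr2 : List Int) (out : List String) : Decidable (Spec_solution n arr1 arr2 out) := by unfold Spec_solution; infer_instance

-- ===== CLAIM (what is proved, stated in full; the proofs are below) =====
def Claim_equal_solution : Prop := ∀ (n : Int) (arr1 : List Int) (arr2 : List Int), Dom_solution n arr1 arr2 → Pre_solution n arr1 arr2 → Spec_solution n arr1 arr2 (solution n arr1 arr2)

-- ===== LEMMAS AND PROOFS =====

-- the low m bits of a, most significant first (floor semantics, as Python's % and //)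
def bits : Nat → Int → List Int
  | 0, _ => []
  | m+1, a => bits m (PySem.Int.floordiv a 2) ++ [PySem.Int.mod a 2]

def chS (u v : Int) : String := if u ≠ 0 ∨ v ≠ 0 then "#" else " "

-- the row characters produced for the low m bits, most significant first
def chs : Nat → Int → Int → List String
  | 0, _, _ => []
  | m+1, a, b => chs m (PySem.Int.floordiv a 2) (PySem.Int.floordiv b 2)
                 ++ [chS (PySem.Int.mod a 2) (PySem.Int.mod b 2)]

theorem bits_len (m : Nat) : ∀ a, (bits m a).length = m := by
  induction m with
  | zero => intro a; simp [bits]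
  | succ k ih => intro a; simp [bits, ih]

theorem foldA (l : List Int) : ∀ (acc : List Int) (a : Int),
    (l.foldl (fun (st : List Int × Int) (_ : Int) =>
        (PySem.Int.mod st.2 2 :: st.1, PySem.Int.floordiv st.2 2)) (acc, a)).1
      = bits l.length a ++ acc := by
  induction l with
  | nil => intro acc a; simp [bits]
  | cons x xs ih =>
      intro acc a
      simp only [List.foldl_cons, List.length_cons]
      rw [ih]
      simp [bits]

theorem foldB (l : List Int) : ∀ (acc : List String) (a b : Int),
    (l.foldl (fun (st : List String × Int × Int) (_ : Int) =>
        ((if PySem.Int.mod st.2.1 2 ≠ 0 ∨ PySem.Int.mod st.2.2 2 ≠ 0 then "#" else " ") :: st.1,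
         PySem.Int.floordiv st.2.1 2, PySem.Int.floordiv st.2.2 2)) (acc, a, b)).1
      = chs l.length a b ++ acc := by
  induction l with
  | nil => intro acc a b; simp [chs]
  | cons x xs ih =>
      intro acc a b
      simp only [List.foldl_cons, List.length_cons]
      rw [ih]
      simp [chs, chS]

theorem chs_zip (m : Nat) : ∀ a b, chs m a b = List.zipWith chS (bits m a) (bits m b) := by
  induction m with
  | zero => intro a b; simp [chs, bits]
  | succ k ih =>
      intro a b
      have hlen : (bits k (PySem.Int.floordiv a 2)).length = (bits k (PySem.Int.floordiv b 2)).length := by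
        simp [bits_len]
      simp only [chs, bits, ih]
      rw [List.zipWith_append hlen]
      simp

-- the makeMap loop shape: conditional append of a singleton
theorem fold_if_append {α β : Type} (l : List α) (p : α → Prop) [DecidablePred p] (u v : β) :
    ∀ acc, l.foldl (fun r i => if p i then r ++ [u] else r ++ [v]) acc
      = acc ++ l.map (fun i => if p i then u else v) := by
  induction l with
  | nil => intro acc; simp
  | cons x xs ih =>
      intro acc
      by_cases h : p x <;> simp [h, ih]

-- indexing two length-m lists over range(m) is zipWith
theorem map_getD_cmp (m : Nat) (l1 l2 : List Int)
    (h1 : l1.length = m) (h2 : l2.length = m) :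
    (PySem.List.pyRange 0 (m : Int) 1).map
        (fun i => if PySem.List.pyGetD l1 i 0 = PySem.List.pyGetD l2 i 0 ∧ PySem.List.pyGetD l2 i 0 = 0
                  then (" " : String) else "#")
      = List.zipWith chS l1 l2 := by
  apply List.ext_getElem
  · simp [PySem.List.length_pyRange_one, h1, h2]
  · intro k hk1 hk2
    have hk : k < m := by
      simpa [PySem.List.length_pyRange_one] using hk1
    simp only [List.getElem_map, PySem.List.getElem_pyRange_one, zero_add,
      PySem.List.pyGetD_natCast, List.getElem_zipWith]
    rw [List.getD_eq_getElem l1 0 (by omega), List.getD_eq_getElem l2 0 (by omega)]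
    unfold chS
    split_ifs with hc hd <;> first | rfl | (exfalso; omega)

theorem row_eq (n x y : Int) :
    makeMap n (changeNum n x) (changeNum n y) = PySem.Str.join "" (chs n.toNat x y) := by
  unfold makeMap changeNum
  rw [foldA, foldA, fold_if_append]
  have hlen : (PySem.List.pyRange 0 n 1).length = n.toNat := by
    simp [PySem.List.length_pyRange_one]
  rw [hlen]
  simp only [List.append_nil, List.nil_append]
  by_cases h : 0 ≤ n
  · have hn : n = ((n.toNat : Nat) : Int) := (Int.toNat_of_nonneg h).symm
    rw [hn]
    simp only [Int.toNat_natCast]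
    exact congrArg (PySem.Str.join "")
      ((map_getD_cmp n.toNat (bits n.toNat x) (bits n.toNat y) (bits_len _ _) (bits_len _ _)).trans
        (chs_zip n.toNat x y).symm)
  · have h0 : n.toNat = 0 := by omega
    rw [PySem.List.pyRange_one_eq_nil (by omega), h0]
    simp [chs]

-- ===== VERDICT (by name: the statement is the Claim_ definition above) =====
theorem solution_spec : Claim_equal_solution := by
  intro n arr1 arr2 _ _
  unfold Spec_solution solution solution_alt
  rw [PySem.List.foldl_append_singleton_eq_map, PySem.List.foldl_append_singleton_eq_map]
  simp only [List.nil_append]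
  apply List.map_congr_left
  intro i _
  rw [row_eq, foldB]
  simp [PySem.List.length_pyRange_one]
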